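-- pv_equiv track=rewrite | github.com/msergeant/adventofcode | day04/main.py | meets_criteria
-- ===== SOURCE A (Python) =====
-- def meets_criteria(passwd):
--     digits = list(map(lambda x: (passwd // (10**x)) % 10,
--                       reversed(range(0,6))))
--     doubled = 0
--     for i in range(1,6):
--         if digits[i] < digits[i-1]:
--             return 0
--         elif digits[i] == digits[i-1]:
--             doubled = 1
--
--     return doubled
-- ===== SOURCE B (Python) =====
-- def meets_criteria(passwd):
--     digits = [passwd // 10 ** (5 - i) % 10 for i in range(6)]
--     return int(digits == sorted(digits) and len(set(digits)) < 6)
-- ===== Notes on version B (the rewrite author's own statement) =====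
-- stated objective: alternative
-- what changed: Replaces A's single early-exit adjacent-pair scan with accumulator by a sort-and-compare monotonicity test plus a set-cardinality duplicate test (no adjacency comparison at all; correct because in a nondecreasing list any duplicate is adjacent).
import Mathlib
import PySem

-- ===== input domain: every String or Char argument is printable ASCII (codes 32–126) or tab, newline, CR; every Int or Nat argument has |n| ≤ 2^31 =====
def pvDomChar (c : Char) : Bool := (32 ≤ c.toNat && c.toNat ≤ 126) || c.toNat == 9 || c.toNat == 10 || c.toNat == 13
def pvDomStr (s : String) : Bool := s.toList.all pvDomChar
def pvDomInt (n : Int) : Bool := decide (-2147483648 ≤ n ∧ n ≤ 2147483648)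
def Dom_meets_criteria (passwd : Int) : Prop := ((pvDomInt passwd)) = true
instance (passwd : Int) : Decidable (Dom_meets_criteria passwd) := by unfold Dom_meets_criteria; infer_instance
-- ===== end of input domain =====

-- B replaces A's early-exit adjacent-pair scan by sort-and-compare plus a set-cardinality duplicate test; objective: alternative.

-- ===== PORT A =====
-- the for-loop over range(1,6) with early return and the 'doubled' accumulator
def mcLoop (digits : List Int) : List Int → Int → Int
  | [], doubled => doubled
  | i :: rest, doubled =>
    -- digits[i] / digits[i-1]; indices 1..5 are in range for the 6-element list, getD 0 unreachable
    let a := (PySem.List.pyGet? digits i).getD 0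
    let b := (PySem.List.pyGet? digits (i - 1)).getD 0
    if a < b then 0
    else if a == b then mcLoop digits rest 1
    else mcLoop digits rest doubled

def meets_criteria (passwd : Int) : Int :=
  let digits := ((PySem.List.pyRange 0 6 1).reverse).map
    (fun x => PySem.Int.mod (PySem.Int.floordiv passwd (10 ^ x.toNat)) 10)
  mcLoop digits (PySem.List.pyRange 1 6 1) 0

-- ===== PORT B =====
def meets_criteria_alt (passwd : Int) : Int :=
  let digits := (PySem.List.pyRange 0 6 1).map
    (fun i => PySem.Int.mod (PySem.Int.floordiv passwd (10 ^ (5 - i).toNat)) 10)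
  if digits = PySem.List.sorted digits (fun x => x) false ∧
      (PySem.Set.ofList digits).length < 6 then 1 else 0

-- ===== PRECONDITION & SPEC =====
def Spec_meets_criteria (passwd : Int) (out : Int) : Prop := out = meets_criteria_alt passwd
instance (passwd : Int) (out : Int) : Decidable (Spec_meets_criteria passwd out) := by unfold Spec_meets_criteria; infer_instance

-- ===== CLAIM (what is proved, stated in full; the proofs are below) =====
def Claim_equal_meets_criteria : Prop := ∀ (passwd : Int), Dom_meets_criteria passwd → Spec_meets_criteria passwd (meets_criteria passwd)

-- ===== LEMMAS AND PROOFS =====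

-- A's loop on six abstract digits, as a condition on adjacent pairs
set_option maxHeartbeats 4000000 in
theorem mc_core (d0 d1 d2 d3 d4 d5 : Int) :
    mcLoop [d0, d1, d2, d3, d4, d5] [1, 2, 3, 4, 5] 0 =
      (if ([(d0,d1),(d1,d2),(d2,d3),(d3,d4),(d4,d5)].all (fun p => p.1 ≤ p.2) &&
           [(d0,d1),(d1,d2),(d2,d3),(d3,d4),(d4,d5)].any (fun p => p.1 == p.2)) then 1 else 0) := by
  simp only [mcLoop]
  norm_num [PySem.List.pyGet?, PySem.List.pyIdx?, PySem.Raise.InRange]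
  split_ifs <;> simp_all <;> omega

-- a list equals its Python sort iff it is nondecreasing
theorem sorted_self_iff (l : List Int) :
    l = PySem.List.sorted l (fun x => x) false ↔ l.Pairwise (· ≤ ·) := by
  constructor
  · intro h
    have hp := PySem.List.sorted_pairwise (xs := l) (key := fun x : Int => x)
    rw [← h] at hp
    exact hp
  · intro h
    exact (PySem.List.sorted_eq_self_of_pairwise l (fun x => x) h).symm

-- len(set(xs)) < len(xs) iff xs has a duplicate
theorem setlen (xs : List Int) : (PySem.Set.ofList xs).length < xs.length ↔ ¬ xs.Nodup := by
  have hn := PySem.Set.nodup_ofList xs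
  have hfin : (PySem.Set.ofList xs).toFinset = xs.toFinset := by
    ext y; simp [List.mem_toFinset, PySem.Set.mem_ofList]
  have hlen : (PySem.Set.ofList xs).length = xs.toFinset.card := by
    rw [← hfin, List.toFinset_card_of_nodup hn]
  rw [hlen, List.card_toFinset]
  constructor
  · intro h hnd
    rw [List.dedup_eq_self.2 hnd] at h; omega
  · intro h
    have hs := (List.dedup_sublist xs).length_le
    rcases lt_or_eq_of_le hs with hlt | heq
    · exact hlt
    · exact absurd (List.dedup_eq_self.mp ((List.dedup_sublist xs).eq_of_length heq)) h

-- the two programs agree on six abstract digits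
set_option maxHeartbeats 4000000 in
set_option maxRecDepth 8000 in
theorem core (d0 d1 d2 d3 d4 d5 : Int) :
    mcLoop [d0, d1, d2, d3, d4, d5] [1, 2, 3, 4, 5] 0 =
      (if [d0, d1, d2, d3, d4, d5] = PySem.List.sorted [d0, d1, d2, d3, d4, d5] (fun x => x) false ∧
          (PySem.Set.ofList [d0, d1, d2, d3, d4, d5]).length < 6 then 1 else 0) := by
  rw [mc_core]
  have hiff : ([d0, d1, d2, d3, d4, d5] = PySem.List.sorted [d0, d1, d2, d3, d4, d5] (fun x => x) false ∧
      (PySem.Set.ofList [d0, d1, d2, d3, d4, d5]).length < 6) ↔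
      (([d0, d1, d2, d3, d4, d5] : List Int).Pairwise (· ≤ ·) ∧ ¬ ([d0, d1, d2, d3, d4, d5] : List Int).Nodup) :=
    and_congr (sorted_self_iff _) (setlen [d0, d1, d2, d3, d4, d5])
  rw [if_congr hiff rfl rfl]
  split_ifs with h1 h2 h2
  · rfl
  · exfalso
    simp [List.pairwise_cons, List.nodup_cons, not_or] at h1 h2
    omega
  · exfalso
    simp [List.pairwise_cons, List.nodup_cons, not_or] at h1 h2
    omega
  · rfl

-- ===== VERDICT (by name: the statement is the Claim_ definition above) =====
theorem meets_criteria_spec : Claim_equal_meets_criteria := by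
  intro passwd _
  show meets_criteria passwd = meets_criteria_alt passwd
  unfold meets_criteria meets_criteria_alt
  have h : PySem.List.pyRange 0 6 1 = [0, 1, 2, 3, 4, 5] := by decide
  have h1 : PySem.List.pyRange 1 6 1 = [1, 2, 3, 4, 5] := by decide
  rw [h, h1]
  norm_num [List.map]
  exact core _ _ _ _ _ _
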